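-- pv_equiv track=rewrite | github.com/savithasam88/CLEVR-POC | clevr-poc-dataset-gen/image_generation/generate_environment.py | getObjects
-- ===== SOURCE A (Python) =====
-- def getObjects(preds, obj_rm, given_query):
--     #object(color, material, shape, size, region)
--     complete = {}
--     incomplete = {}
--     for pred in preds:
--         if 'hasProperty' in pred:
--             pred_split = pred.split("(")
--             obj_prop_val = pred_split[1].split(",")
--             obj  = obj_prop_val[0]
--             prop = obj_prop_val[1]
--             val = obj_prop_val[2][0:len(obj_prop_val[2])-1]
--             try:
--                 complete[int(obj)][prop] = val
--             except:
--                 complete[int(obj)] = {}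
--                 complete[int(obj)][prop] = val
--             if int(obj)!=obj_rm:
--                 try:
--                     incomplete[int(obj)][prop] = val
--                 except:
--                     incomplete[int(obj)] = {}
--                     incomplete[int(obj)][prop] = val
--             else:
--                 if prop in given_query:
--                     try:
--                         incomplete[int(obj)][prop] = val
--                     except:
--                         incomplete[int(obj)] = {}
--                         incomplete[int(obj)][prop] = val
--
--         elif 'at(' in pred:
--             pred_split = pred.split("(")
--             obj_reg = pred_split[1].split(",")
--             obj = obj_reg[0]
--             reg = obj_reg[1][0:len(obj_reg[1])-1]
--             try:
--                 complete[int(obj)]['region'] = reg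
--             except:
--                 complete[int(obj)] = {}
--                 complete[int(obj)]['region'] = reg
--             if int(obj)!=obj_rm:
--                 try:
--                     incomplete[int(obj)]['region'] = reg
--                 except:
--                     incomplete[int(obj)] = {}
--                     incomplete[int(obj)]['region'] = reg
--     return complete, incomplete
-- ===== SOURCE B (Python) =====
-- def getObjects(preds, obj_rm, given_query):
--     # Phase 1: parse each predicate once into a record (obj, key, value, eligible_for_incomplete)
--     records = []
--     for pred in preds:
--         if 'hasProperty' in pred:
--             body = pred.split("(")[1].split(",")
--             obj = int(body[0])
--             records.append((obj, body[1], body[2][:-1],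
--                             obj != obj_rm or body[1] in given_query))
--         elif 'at(' in pred:
--             body = pred.split("(")[1].split(",")
--             obj = int(body[0])
--             records.append((obj, 'region', body[1][:-1], obj != obj_rm))
--     # Phase 2: accumulate the two nested dicts
--     complete = {}
--     for obj, key, value, _ in records:
--         complete.setdefault(obj, {})[key] = value
--     incomplete = {}
--     for obj, key, value, ok in records:
--         if ok:
--             incomplete.setdefault(obj, {})[key] = value
--     return complete, incomplete
-- ===== Notes on version B (the rewrite author's own statement) =====
-- stated objective: simpler
-- what changed: A's single loop with interleaved try/except dict updates is split into a classify phase that parses each predicate once into a record (obj, key, value, eligible) and two plain setdefault accumulation passes building complete and incomplete.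
import Mathlib
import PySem

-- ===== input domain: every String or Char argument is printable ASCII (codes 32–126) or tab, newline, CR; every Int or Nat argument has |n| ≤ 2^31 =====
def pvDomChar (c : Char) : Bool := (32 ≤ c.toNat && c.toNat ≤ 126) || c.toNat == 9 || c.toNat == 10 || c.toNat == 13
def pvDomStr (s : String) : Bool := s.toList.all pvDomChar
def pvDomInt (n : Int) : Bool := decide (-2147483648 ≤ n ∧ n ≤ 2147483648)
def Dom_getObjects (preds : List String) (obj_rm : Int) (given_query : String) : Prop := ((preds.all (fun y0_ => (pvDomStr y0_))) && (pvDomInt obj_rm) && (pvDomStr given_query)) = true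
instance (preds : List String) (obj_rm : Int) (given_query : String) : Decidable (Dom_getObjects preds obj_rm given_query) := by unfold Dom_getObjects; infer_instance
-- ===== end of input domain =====

-- B re-implements A as a classify phase (parse each predicate once into a record) followed by
-- two plain accumulation passes, instead of A's single loop with interleaved try/except updates.

-- ===== PORT A =====
-- Python's `try: d[k][p]=v except: d[k]={}; d[k][p]=v` — the except fires exactly when k is absent
def pvNest (d : PySem.Dict Int (PySem.Dict String String)) (obj : Int) (prop val : String) :
    PySem.Dict Int (PySem.Dict String String) :=
  match d.get? obj with
  | some inner => d.insert obj (inner.insert prop val)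
  | none => d.insert obj (PySem.Dict.empty.insert prop val)

-- loop body of A; `.getD … ""` / `.getD 0` are only reached outside Pre_ (where Python A raises)
def pvStepA (obj_rm : Int) (given_query : String)
    (st : PySem.Dict Int (PySem.Dict String String) × PySem.Dict Int (PySem.Dict String String))
    (pred : String) :
    PySem.Dict Int (PySem.Dict String String) × PySem.Dict Int (PySem.Dict String String) :=
  if PySem.Str.isIn "hasProperty" pred then
    let obj_prop_val := ((PySem.Str.split? (((PySem.Str.split? pred "(").getD []).getD 1 "") ",").getD [])
    let obj := (PySem.Int.ofStr? (obj_prop_val.getD 0 "")).getD 0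
    let prop := obj_prop_val.getD 1 ""
    let v2 := (obj_prop_val.getD 2 "").toList
    let val := String.ofList (v2.take (v2.length - 1))   -- x[0:len(x)-1], exact also for the empty string
    let c := pvNest st.1 obj prop val
    let i := if obj ≠ obj_rm then pvNest st.2 obj prop val
             else if PySem.Str.isIn prop given_query then pvNest st.2 obj prop val
             else st.2
    (c, i)
  else if PySem.Str.isIn "at(" pred then
    let obj_reg := ((PySem.Str.split? (((PySem.Str.split? pred "(").getD []).getD 1 "") ",").getD [])
    let obj := (PySem.Int.ofStr? (obj_reg.getD 0 "")).getD 0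
    let v1 := (obj_reg.getD 1 "").toList
    let reg := String.ofList (v1.take (v1.length - 1))
    let c := pvNest st.1 obj "region" reg
    let i := if obj ≠ obj_rm then pvNest st.2 obj "region" reg else st.2
    (c, i)
  else st

def getObjects (preds : List String) (obj_rm : Int) (given_query : String) :
    (List (Int × List (String × String))) × (List (Int × List (String × String))) :=
  let st := preds.foldl (pvStepA obj_rm given_query) (PySem.Dict.empty, PySem.Dict.empty)
  (st.1.items.map (fun kv => (kv.1, kv.2.items)), st.2.items.map (fun kv => (kv.1, kv.2.items)))

-- ===== PORT B =====
-- classify: one record (obj, key, value, eligible-for-incomplete) per recognised predicate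
def pvClassify (obj_rm : Int) (given_query : String) (pred : String) :
    Option (Int × String × String × Bool) :=
  if PySem.Str.isIn "hasProperty" pred then
    let body := ((PySem.Str.split? (((PySem.Str.split? pred "(").getD []).getD 1 "") ",").getD [])
    let obj := (PySem.Int.ofStr? (body.getD 0 "")).getD 0
    some (obj, body.getD 1 "", String.ofList (body.getD 2 "").toList.dropLast,   -- x[:-1]
          decide (obj ≠ obj_rm) || PySem.Str.isIn (body.getD 1 "") given_query)
  else if PySem.Str.isIn "at(" pred then
    let body := ((PySem.Str.split? (((PySem.Str.split? pred "(").getD []).getD 1 "") ",").getD [])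
    let obj := (PySem.Int.ofStr? (body.getD 0 "")).getD 0
    some (obj, "region", String.ofList (body.getD 1 "").toList.dropLast, decide (obj ≠ obj_rm))
  else none

-- Python's d.setdefault(obj, {})[key] = value
def pvPut (d : PySem.Dict Int (PySem.Dict String String)) (r : Int × String × String × Bool) :
    PySem.Dict Int (PySem.Dict String String) :=
  d.insert r.1 ((d.getD r.1 PySem.Dict.empty).insert r.2.1 r.2.2.1)

def getObjects_alt (preds : List String) (obj_rm : Int) (given_query : String) :
    (List (Int × List (String × String))) × (List (Int × List (String × String))) :=
  let records := preds.filterMap (pvClassify obj_rm given_query)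
  let complete := records.foldl pvPut PySem.Dict.empty
  let incomplete := (records.filter (fun r => r.2.2.2)).foldl pvPut PySem.Dict.empty
  (complete.items.map (fun kv => (kv.1, kv.2.items)),
   incomplete.items.map (fun kv => (kv.1, kv.2.items)))

-- ===== PRECONDITION & SPEC =====
-- Pre_ excludes exactly the inputs on which the Python A raises: a predicate matching
-- 'hasProperty'/'at(' whose parenthesised body lacks the required comma-fields, has no '(',
-- or whose object field is not int()-parsable (IndexError / ValueError).
def pvPredOk (p : String) : Bool :=
  if PySem.Str.isIn "hasProperty" p then
    let fields := ((PySem.Str.split? (((PySem.Str.split? p "(").getD []).getD 1 "") ",").getD [])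
    PySem.Str.isIn "(" p && decide (3 ≤ fields.length) && (PySem.Int.ofStr? (fields.getD 0 "")).isSome
  else if PySem.Str.isIn "at(" p then
    let fields := ((PySem.Str.split? (((PySem.Str.split? p "(").getD []).getD 1 "") ",").getD [])
    decide (2 ≤ fields.length) && (PySem.Int.ofStr? (fields.getD 0 "")).isSome
  else true

def Pre_getObjects (preds : List String) (obj_rm : Int) (given_query : String) : Prop :=
  preds.all pvPredOk = true

instance (preds : List String) (obj_rm : Int) (given_query : String) : Decidable (Pre_getObjects preds obj_rm given_query) := by unfold Pre_getObjects; infer_instance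

def pvWitness_getObjects : List String × Int × String :=
  (["hasProperty(0,color,red)", "at(0,r1)", "hasProperty(1,shape,cube)", "at(1,r2)"], 1, "shape")

def Spec_getObjects (preds : List String) (obj_rm : Int) (given_query : String) (out : (List (Int × List (String × String))) × (List (Int × List (String × String)))) : Prop := out = getObjects_alt preds obj_rm given_query
instance (preds : List String) (obj_rm : Int) (given_query : String) (out : (List (Int × List (String × String))) × (List (Int × List (String × String)))) : Decidable (Spec_getObjects preds obj_rm given_query out) := by unfold Spec_getObjects; infer_instance

-- ===== CLAIM (what is proved, stated in full; the proofs are below) =====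
def Claim_equal_getObjects : Prop := ∀ (preds : List String) (obj_rm : Int) (given_query : String), Dom_getObjects preds obj_rm given_query → Pre_getObjects preds obj_rm given_query → Spec_getObjects preds obj_rm given_query (getObjects preds obj_rm given_query)

-- ===== LEMMAS AND PROOFS =====
lemma pvPut_eq_pvNest (d : PySem.Dict Int (PySem.Dict String String)) (r : Int × String × String × Bool) :
    pvPut d r = pvNest d r.1 r.2.1 r.2.2.1 := by
  unfold pvNest pvPut PySem.Dict.getD
  cases d.get? r.1 <;> rfl

-- proof-only abbreviation for the parsed comma-fields of a predicate
def pvFields (p : String) : List String :=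
  (PySem.Str.split? (((PySem.Str.split? p "(").getD []).getD 1 "") ",").getD []

lemma pvLoop_eq (obj_rm : Int) (gq : String) (preds : List String)
    (c i : PySem.Dict Int (PySem.Dict String String)) :
    preds.foldl (pvStepA obj_rm gq) (c, i) =
      ((preds.filterMap (pvClassify obj_rm gq)).foldl pvPut c,
       ((preds.filterMap (pvClassify obj_rm gq)).filter (fun r => r.2.2.2)).foldl pvPut i) := by
  induction preds generalizing c i with
  | nil => simp
  | cons p ps ih =>
    simp only [List.foldl_cons, List.filterMap_cons]
    by_cases h1 : PySem.Str.isIn "hasProperty" p = true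
    · by_cases h2 : (PySem.Int.ofStr? ((pvFields p).getD 0 "")).getD 0 = obj_rm
      · by_cases h3 : PySem.Str.isIn ((pvFields p).getD 1 "") gq = true
        · simp only [pvFields] at h2 h3
          simp at h1 h2 h3
          simp [pvStepA, pvClassify, h1, h2, h3, ih, pvPut_eq_pvNest, List.dropLast_eq_take]
        · simp only [pvFields] at h2 h3
          simp at h1 h2 h3
          simp [pvStepA, pvClassify, h1, h2, h3, ih, pvPut_eq_pvNest, List.dropLast_eq_take]
      · simp only [pvFields] at h2
        simp at h1 h2
        simp [pvStepA, pvClassify, h1, h2, ih, pvPut_eq_pvNest, List.dropLast_eq_take]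
    · by_cases h4 : PySem.Str.isIn "at(" p = true
      · by_cases h2 : (PySem.Int.ofStr? ((pvFields p).getD 0 "")).getD 0 = obj_rm
        · simp only [pvFields] at h2
          simp at h1 h4 h2
          simp [pvStepA, pvClassify, h1, h4, h2, ih, pvPut_eq_pvNest, List.dropLast_eq_take]
        · simp only [pvFields] at h2
          simp at h1 h4 h2
          simp [pvStepA, pvClassify, h1, h4, h2, ih, pvPut_eq_pvNest, List.dropLast_eq_take]
      · simp at h1 h4
        simp [pvStepA, pvClassify, h1, h4, ih]

-- ===== VERDICT (by name: the statement is the Claim_ definition above) =====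
theorem getObjects_spec : Claim_equal_getObjects := by
  intro preds obj_rm gq _ _
  unfold Spec_getObjects getObjects getObjects_alt
  rw [pvLoop_eq]
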